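-- pv_equiv track=rewrite | github.com/loew-tech/advent_of_code_2023 | utils.py | populate_boxes
-- ===== SOURCE A (Python) =====
-- from typing import Tuple, Callable, Any, Generator, DefaultDict, Set, Iterable, \
--     List, Dict
--
-- def get_hash_val(str_: str) -> int:
--     val = 0
--     for c in str_:
--         val = ((val + ord(c)) * 17) % 256
--     return val
--
-- def populate_boxes(data: List[str]) -> List[Dict[str, int]]:
--     boxes = [{} for _ in range(256)]
--     for entry in data:
--         if '=' in entry:
--             label, len_length = entry.split('=')
--             hash_ = get_hash_val(label)
--             boxes[hash_][label] = int(len_length)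
--         else:
--             label = entry.split('-')[0]
--             hash_ = get_hash_val(label)
--             if label in boxes[hash_]:
--                 del boxes[hash_][label]
--     return boxes
-- ===== SOURCE B (Python) =====
-- def get_hash_val(str_: str) -> int:
--     val = 0
--     for c in str_:
--         val = ((val + ord(c)) * 17) % 256
--     return val
--
--
-- def populate_boxes(data):
--     # Timestamp algorithm: one scan recording, per label, its last assigned value
--     # and the time of its first '=' since it was last removed (popped on '-');
--     # survivors are then bucketed into the 256 boxes in timestamp order.
--     last_val = {}
--     ins_time = {}
--     for i, entry in enumerate(data):
--         if '=' in entry: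
--             label, focal = entry.split('=')
--             last_val[label] = int(focal)
--             if label not in ins_time:
--                 ins_time[label] = i
--         else:
--             ins_time.pop(entry.split('-')[0], None)
--     boxes = [[] for _ in range(256)]
--     for label, _ in sorted(ins_time.items(), key=lambda kv: kv[1]):
--         boxes[get_hash_val(label)].append((label, last_val[label]))
--     return [dict(pairs) for pairs in boxes]
-- ===== Notes on version B (the rewrite author's own statement) =====
-- stated objective: faster
-- what changed: B abandons A's step-by-step simulation of 256 mutable dict boxes: one scan over the instructions records, per label, its last assigned value and the timestamp of its first '=' since its last '-' (popped unconditionally on '-'), then the surviving labels are bucketed into the 256 boxes in one pass in timestamp order; the hash is computed once per surviving label instead of once per instruction.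
-- outside the precondition, e.g. on populate_boxes(['a=b']): A raises ValueError, B raises ValueError; on populate_boxes(['a=1=2']): A raises ValueError, B raises ValueError
import Mathlib
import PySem

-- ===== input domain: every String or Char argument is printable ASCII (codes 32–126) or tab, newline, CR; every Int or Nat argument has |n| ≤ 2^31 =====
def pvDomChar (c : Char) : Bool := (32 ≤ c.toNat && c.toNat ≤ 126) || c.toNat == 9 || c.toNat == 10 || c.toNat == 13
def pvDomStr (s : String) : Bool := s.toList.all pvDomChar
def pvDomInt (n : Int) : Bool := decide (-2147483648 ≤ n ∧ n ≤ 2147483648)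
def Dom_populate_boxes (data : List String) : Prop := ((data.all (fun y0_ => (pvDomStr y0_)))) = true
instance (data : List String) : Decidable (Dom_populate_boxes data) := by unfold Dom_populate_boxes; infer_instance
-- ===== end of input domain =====

-- B replaces A's step-by-step simulation of 256 dict boxes by a timestamp algorithm: one scan
-- records, per label, its last assigned value and the time of its first '=' since its last '-';
-- the surviving labels are then bucketed into the 256 boxes in timestamp order.
-- Objective: faster (constant factor, measured: the hash is computed once per
-- surviving label, not once per instruction). Return-value equivalence only
-- (A builds its result by mutating the dicts in place, but callers only see the returned list).

-- ===== PORT A =====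
-- shared helper: the module's get_hash_val, used verbatim by both Pythons
def get_hash_val (str_ : String) : Int :=
  str_.toList.foldl (fun val c => PySem.Int.mod ((val + (c.toNat : Int)) * 17) 256) 0

-- loop body of A; where Python raises (split('=') not into 2 parts, int() failing) Pre_ excludes
-- the input and the port leaves the boxes unchanged
def stepA (boxes : List (PySem.Dict String Int)) (entry : String) : List (PySem.Dict String Int) :=
  if PySem.Str.isIn "=" entry then
    if ((PySem.Str.split? entry "=").getD []).length = 2 then
      match PySem.Int.ofStr? (((PySem.Str.split? entry "=").getD []).getD 1 "") with
      | some v =>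
        let label := ((PySem.Str.split? entry "=").getD []).getD 0 ""
        let h := (get_hash_val label).toNat
        boxes.set h ((boxes.getD h PySem.Dict.empty).insert label v)
      | none => boxes
    else boxes
  else
    let label := ((PySem.Str.split? entry "-").getD []).getD 0 ""
    let h := (get_hash_val label).toNat
    if (boxes.getD h PySem.Dict.empty).contains label then
      boxes.set h ((boxes.getD h PySem.Dict.empty).erase label)
    else boxes

def populate_boxes (data : List String) : List (List (String × Int)) :=
  (data.foldl stepA (List.replicate 256 PySem.Dict.empty)).map PySem.Dict.items

-- ===== PORT B =====
def hashIdx (label : String) : Nat := (get_hash_val label).toNat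

-- the single scan: st.1 = last_val, st.2 = ins_time; p = (i, entry) from enumerate(data)
def stepB (st : PySem.Dict String Int × PySem.Dict String Int) (p : Int × String) :
    PySem.Dict String Int × PySem.Dict String Int :=
  if PySem.Str.isIn "=" p.2 then
    if ((PySem.Str.split? p.2 "=").getD []).length = 2 then
      match PySem.Int.ofStr? (((PySem.Str.split? p.2 "=").getD []).getD 1 "") with
      | some v =>
        let label := ((PySem.Str.split? p.2 "=").getD []).getD 0 ""
        (st.1.insert label v,
         if st.2.contains label then st.2 else st.2.insert label p.1)
      | none => st
    else st
  else
    (st.1, st.2.erase (((PySem.Str.split? p.2 "-").getD []).getD 0 ""))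

-- boxes[get_hash_val(label)].append((label, last_val[label]))
def bucketStep (lv : PySem.Dict String Int) (bs : List (List (String × Int)))
    (kv : String × Int) : List (List (String × Int)) :=
  bs.set (hashIdx kv.1) ((bs.getD (hashIdx kv.1) []) ++ [(kv.1, lv.getD kv.1 0)])

def populate_boxes_alt (data : List String) : List (List (String × Int)) :=
  let st := (PySem.List.enumerate data 0).foldl stepB (PySem.Dict.empty, PySem.Dict.empty)
  let boxes := (PySem.List.sorted st.2.items (fun kv => kv.2) false).foldl
    (bucketStep st.1) (List.replicate 256 [])
  boxes.map (fun pairs =>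
    (pairs.foldl (fun d p => d.insert p.1 p.2) PySem.Dict.empty).items)

-- ===== PRECONDITION & SPEC =====
-- Pre_ excludes exactly the inputs on which A raises ValueError: an entry containing '=' whose
-- split('=') does not have exactly 2 parts, or whose part after '=' is not int()-parseable.
def Pre_populate_boxes (data : List String) : Prop :=
  ∀ entry ∈ data, PySem.Str.isIn "=" entry = true →
    ((PySem.Str.split? entry "=").getD []).length = 2 ∧
    (PySem.Int.ofStr? (((PySem.Str.split? entry "=").getD []).getD 1 "")).isSome = true
instance (data : List String) : Decidable (Pre_populate_boxes data) := by
  unfold Pre_populate_boxes; infer_instance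
def pvWitness_populate_boxes : List String := ["ab=5", "cd-", "ab=3", "ab-", "qp=-2"]

def Spec_populate_boxes (data : List String) (out : List (List (String × Int))) : Prop := out = populate_boxes_alt data
instance (data : List String) (out : List (List (String × Int))) : Decidable (Spec_populate_boxes data out) := by unfold Spec_populate_boxes; infer_instance

-- ===== CLAIM (what is proved, stated in full; the proofs are below) =====
def Claim_equal_populate_boxes : Prop := ∀ (data : List String), Dom_populate_boxes data → Pre_populate_boxes data → Spec_populate_boxes data (populate_boxes data)

-- ===== LEMMAS AND PROOFS =====

-- the invariant tying A's box array (after a prefix) to B's (last_val, ins_time) pair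
def BoxInv (bA : List (PySem.Dict String Int)) (lv it : PySem.Dict String Int) (n : Int) : Prop :=
  bA.length = 256 ∧
  (∀ h : Nat, (bA.getD h PySem.Dict.empty).items
      = (it.items.filter (fun p => hashIdx p.1 == h)).map (fun p => (p.1, lv.getD p.1 0))) ∧
  it.keys.Nodup ∧
  it.items.Pairwise (fun p q => p.2 < q.2) ∧
  (∀ p ∈ it.items, p.2 < n)

theorem hashIdx_def (s : String) : (get_hash_val s).toNat = hashIdx s := rfl

theorem getD_set_self' {A : Type} (l : List A) (i : Nat) (x d : A) (h : i < l.length) :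
    (l.set i x).getD i d = x := by
  simp [List.getD_eq_getElem?_getD, List.getElem?_set_self h]

theorem getD_set_ne' {A : Type} (l : List A) {i j : Nat} (x d : A) (h : i ≠ j) :
    (l.set i x).getD j d = l.getD j d := by
  simp [List.getD_eq_getElem?_getD, List.getElem?_set_ne h]

theorem items_erase (d : PySem.Dict String Int) (k : String) :
    (d.erase k).items = d.items.filter (fun p => !(p.1 == k)) := rfl

theorem nodup_erase_keys (d : PySem.Dict String Int) (k : String)
    (hnd : d.keys.Nodup) : (d.erase k).keys.Nodup := by
  have h : (d.erase k).keys = (d.items.filter (fun p => !(p.1 == k))).map Prod.fst := rfl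
  rw [h]
  exact List.Nodup.sublist (List.Sublist.map Prod.fst List.filter_sublist) hnd

theorem not_mem_fst_of_not_contains (it : PySem.Dict String Int) (label : String)
    (hc : ¬ it.contains label = true) : ∀ p ∈ it.items, p.1 ≠ label := by
  intro p hp he
  apply hc
  apply (PySem.Dict.contains_iff_mem_keys _ _).mpr
  rw [← he]
  exact List.mem_map_of_mem hp

-- a label in box hashIdx label of A iff it is in B's ins_time dict
theorem contains_box (bA : List (PySem.Dict String Int)) (lv it : PySem.Dict String Int)
    (hitems : ∀ h : Nat, (bA.getD h PySem.Dict.empty).items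
      = (it.items.filter (fun p => hashIdx p.1 == h)).map (fun p => (p.1, lv.getD p.1 0)))
    (label : String) :
    (bA.getD (hashIdx label) PySem.Dict.empty).contains label = it.contains label := by
  rw [PySem.Dict.contains_eq_decide_mem_keys, PySem.Dict.contains_eq_decide_mem_keys]
  apply decide_eq_decide.mpr
  simp only [PySem.Dict.keys, hitems (hashIdx label), List.map_map, List.mem_map,
    Function.comp]
  constructor
  · rintro ⟨p, hp, hp1⟩
    exact ⟨p, (List.mem_filter.mp hp).1, hp1⟩
  · rintro ⟨p, hp, hp1⟩
    refine ⟨p, List.mem_filter.mpr ⟨hp, ?_⟩, hp1⟩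
    simp [hp1]

theorem get_hash_val_lt (s : String) : hashIdx s < 256 := by
  have key : ∀ (cs : List Char) (v : Int), 0 ≤ v → v < 256 →
      0 ≤ cs.foldl (fun val c => PySem.Int.mod ((val + (c.toNat : Int)) * 17) 256) v ∧
      cs.foldl (fun val c => PySem.Int.mod ((val + (c.toNat : Int)) * 17) 256) v < 256 := by
    intro cs
    induction cs with
    | nil => exact fun v h0 h1 => ⟨h0, h1⟩
    | cons c t ih =>
      intro v h0 h1
      exact ih _ (PySem.Int.mod_nonneg _ (by norm_num)) (PySem.Int.mod_lt _ (by norm_num))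
  have hk := key s.toList 0 (by norm_num) (by norm_num)
  unfold hashIdx get_hash_val
  omega

set_option maxHeartbeats 1000000 in
theorem step_inv (bA : List (PySem.Dict String Int)) (lv it : PySem.Dict String Int)
    (n : Int) (entry : String)
    (hok : PySem.Str.isIn "=" entry = true →
      ((PySem.Str.split? entry "=").getD []).length = 2 ∧
      (PySem.Int.ofStr? (((PySem.Str.split? entry "=").getD []).getD 1 "")).isSome = true)
    (hinv : BoxInv bA lv it n) :
    BoxInv (stepA bA entry) (stepB (lv, it) (n, entry)).1 (stepB (lv, it) (n, entry)).2 (n + 1) := by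
  obtain ⟨hlen, hitems, hnd, hpair, hbound⟩ := hinv
  by_cases hin : PySem.Str.isIn "=" entry = true
  · obtain ⟨h2, hvs⟩ := hok hin
    obtain ⟨v, hv⟩ := Option.isSome_iff_exists.mp hvs
    simp only [stepA, stepB, hin, if_true, if_pos h2, hv, hashIdx_def]
    set label := ((PySem.Str.split? entry "=").getD []).getD 0 "" with hlab
    have hcb := contains_box bA lv it hitems label
    by_cases hc : it.contains label = true
    · -- label already present: both sides overwrite its value in place
      simp only [hc, if_true]
      refine ⟨by simp [hlen], fun h => ?_, hnd, hpair, fun p hp => by have := hbound p hp; omega⟩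
      by_cases hh : hashIdx label = h
      · subst hh
        rw [getD_set_self' _ _ _ _ (by rw [hlen]; exact get_hash_val_lt label),
          PySem.Dict.items_insert_of_contains _ _ (by rw [hcb]; exact hc), hitems,
          List.map_map]
        apply List.map_congr_left
        intro p _
        by_cases hpl : p.1 = label
        · simp [Function.comp, hpl]
        · simp [Function.comp, hpl, PySem.Dict.getD_insert]
      · rw [getD_set_ne' _ _ _ hh, hitems]
        apply List.map_congr_left
        intro p hp
        have hph : hashIdx p.1 = h := by simpa using (List.mem_filter.mp hp).2
        have hpl : p.1 ≠ label := fun he => hh (by rw [← he, hph])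
        simp [PySem.Dict.getD_insert, hpl]
    · -- fresh label: both sides append it
      simp only [hc, Bool.false_eq_true, if_false]
      have hne : ∀ p ∈ it.items, p.1 ≠ label :=
        not_mem_fst_of_not_contains it label (by simpa using hc)
      refine ⟨by simp [hlen], fun h => ?_,
        PySem.Dict.nodup_keys_insert _ _ _ hnd, ?_, ?_⟩
      · rw [PySem.Dict.items_insert_of_not_contains _ _ (by simpa using hc),
          List.filter_append, List.map_append]
        by_cases hh : hashIdx label = h
        · subst hh
          rw [getD_set_self' _ _ _ _ (by rw [hlen]; exact get_hash_val_lt label),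
            PySem.Dict.items_insert_of_not_contains _ _ (by rw [hcb]; simpa using hc),
            hitems]
          have h1 : List.filter (fun p => hashIdx p.1 == hashIdx label) [(label, n)]
              = [(label, n)] := by simp
          rw [h1]
          simp only [List.map_cons, List.map_nil, PySem.Dict.getD_insert_self]
          congr 1
          apply List.map_congr_left
          intro p hp
          have hpl : p.1 ≠ label := hne p (List.mem_filter.mp hp).1
          simp [PySem.Dict.getD_insert, hpl]
        · rw [getD_set_ne' _ _ _ hh, hitems]
          have h1 : List.filter (fun p => hashIdx p.1 == h) [(label, n)] = [] := by
            simp [hh]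
          rw [h1]
          simp only [List.map_nil, List.append_nil]
          apply List.map_congr_left
          intro p hp
          have hpl : p.1 ≠ label := hne p (List.mem_filter.mp hp).1
          simp [PySem.Dict.getD_insert, hpl]
      · rw [PySem.Dict.items_insert_of_not_contains _ _ (by simpa using hc)]
        rw [List.pairwise_append]
        exact ⟨hpair, by simp, fun p hp q hq => by
          have := hbound p hp
          simp only [List.mem_singleton] at hq
          subst hq
          exact this⟩
      · intro p hp
        rw [PySem.Dict.items_insert_of_not_contains _ _ (by simpa using hc)] at hp
        rcases List.mem_append.mp hp with hp | hp
        · have := hbound p hp; omega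
        · simp only [List.mem_singleton] at hp; subst hp; omega
  · -- '-' entry: A erases if present; B always pops
    have hin' : PySem.Str.isIn "=" entry = false := by simpa using hin
    simp only [stepA, stepB, hin', Bool.false_eq_true, if_false, hashIdx_def]
    set label := ((PySem.Str.split? entry "-").getD []).getD 0 "" with hlab
    have hcb := contains_box bA lv it hitems label
    have hnd' : (it.erase label).keys.Nodup := nodup_erase_keys it label hnd
    have hpair' : (it.erase label).items.Pairwise (fun p q => p.2 < q.2) := by
      rw [items_erase]
      exact List.Pairwise.sublist List.filter_sublist hpair
    have hbound' : ∀ p ∈ (it.erase label).items, p.2 < n + 1 := by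
      intro p hp
      rw [items_erase] at hp
      have := hbound p (List.mem_of_mem_filter hp); omega
    by_cases hc : it.contains label = true
    · rw [if_pos (by rw [hcb]; exact hc)]
      refine ⟨by simp [hlen], fun h => ?_, hnd', hpair', hbound'⟩
      rw [items_erase]
      by_cases hh : hashIdx label = h
      · subst hh
        rw [getD_set_self' _ _ _ _ (by rw [hlen]; exact get_hash_val_lt label),
          items_erase, hitems, List.filter_map, List.filter_comm]
        rfl
      · rw [getD_set_ne' _ _ _ hh, hitems, List.filter_comm]
        congr 1
        symm
        apply List.filter_eq_self.mpr
        intro p hp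
        have hph : hashIdx p.1 = h := by simpa using (List.mem_filter.mp hp).2
        have hpl : p.1 ≠ label := fun he => hh (by rw [← he, hph])
        simpa using hpl
    · rw [if_neg (by rw [hcb]; exact hc)]
      have hne : ∀ p ∈ it.items, p.1 ≠ label :=
        not_mem_fst_of_not_contains it label (by simpa using hc)
      have heq : (it.erase label).items = it.items := by
        rw [items_erase]
        apply List.filter_eq_self.mpr
        intro p hp
        simpa using hne p hp
      exact ⟨hlen, fun h => by rw [heq]; exact hitems h, hnd', hpair', hbound'⟩

theorem fold_inv (data : List String) (bA : List (PySem.Dict String Int))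
    (lv it : PySem.Dict String Int) (n : Int)
    (hpre : ∀ entry ∈ data, PySem.Str.isIn "=" entry = true →
      ((PySem.Str.split? entry "=").getD []).length = 2 ∧
      (PySem.Int.ofStr? (((PySem.Str.split? entry "=").getD []).getD 1 "")).isSome = true)
    (hinv : BoxInv bA lv it n) :
    BoxInv (data.foldl stepA bA)
      ((PySem.List.enumerate data n).foldl stepB (lv, it)).1
      ((PySem.List.enumerate data n).foldl stepB (lv, it)).2
      (n + data.length) := by
  induction data generalizing bA lv it n with
  | nil => simpa using hinv
  | cons e t ih =>
    rw [PySem.List.enumerate_cons]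
    simp only [List.foldl_cons]
    cases hst : stepB (lv, it) (n, e) with
    | mk lv' it' =>
      have hs := step_inv bA lv it n e (hpre e (by simp)) hinv
      rw [hst] at hs
      have := ih (stepA bA e) lv' it' (n + 1)
        (fun entry hm => hpre entry (by simp [hm])) hs
      simpa [add_comm, add_left_comm, add_assoc] using this

theorem bucket_getD (lv : PySem.Dict String Int) (L : List (String × Int))
    (bs : List (List (String × Int))) (hlen : bs.length = 256) (h : Nat) :
    (L.foldl (bucketStep lv) bs).getD h []
      = bs.getD h [] ++ (L.filter (fun p => hashIdx p.1 == h)).map (fun p => (p.1, lv.getD p.1 0)) := by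
  induction L generalizing bs with
  | nil => simp
  | cons kv t ih =>
    simp only [List.foldl_cons, List.filter_cons]
    have hlen' : (bucketStep lv bs kv).length = 256 := by
      simp [bucketStep, hlen]
    rw [ih _ hlen']
    by_cases hh : hashIdx kv.1 = h
    · subst hh
      have hlt : hashIdx kv.1 < bs.length := by rw [hlen]; exact get_hash_val_lt kv.1
      simp [bucketStep, List.getD_eq_getElem?_getD, List.getElem?_set_self hlt]
    · have : (hashIdx kv.1 == h) = false := by simp [hh]
      simp only [this, Bool.false_eq_true, if_false]
      have : (bucketStep lv bs kv).getD h [] = bs.getD h [] := by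
        simp [bucketStep, List.getD_eq_getElem?_getD, List.getElem?_set_ne hh]
      rw [this]

theorem bucket_length (lv : PySem.Dict String Int) (L : List (String × Int))
    (bs : List (List (String × Int))) : (L.foldl (bucketStep lv) bs).length = bs.length := by
  induction L generalizing bs with
  | nil => rfl
  | cons kv t ih => simp [List.foldl_cons, ih, bucketStep]

-- converting a nodup-keyed pair list back to a dict is the identity on items
theorem roundtrip (l : List (String × Int)) (hnd : (l.map Prod.fst).Nodup) :
    (l.foldl (fun d p => d.insert p.1 p.2) PySem.Dict.empty).items = l := by
  have := PySem.Dict.items_foldl_insert_fresh (l := l) (k := Prod.fst) (v := Prod.snd)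
    (d := (PySem.Dict.empty : PySem.Dict String Int))
    (fun a _ => PySem.Dict.contains_empty a.1) hnd
  simpa using this

-- ===== VERDICT (by name: the statement is the Claim_ definition above) =====
theorem populate_boxes_spec : Claim_equal_populate_boxes := by
  intro data _ hpre
  unfold Spec_populate_boxes
  have hinit : BoxInv (List.replicate 256 PySem.Dict.empty) PySem.Dict.empty PySem.Dict.empty 0 := by
    refine ⟨by rw [List.length_replicate], fun h => ?_, PySem.Dict.nodup_keys_empty, ?_, ?_⟩
    · have h1 : ((List.replicate 256 (PySem.Dict.empty : PySem.Dict String Int)).getD h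
          PySem.Dict.empty) = PySem.Dict.empty := by
        rw [List.getD_eq_getElem?_getD, List.getElem?_replicate]
        split <;> rfl
      rw [h1]
      rfl
    · exact List.Pairwise.nil
    · intro p hp
      rw [show (PySem.Dict.empty : PySem.Dict String Int).items = [] from rfl] at hp
      exact absurd hp (by simp)
  obtain ⟨hlen, hitems, hnd, hpair, -⟩ :=
    fold_inv data (List.replicate 256 PySem.Dict.empty) PySem.Dict.empty PySem.Dict.empty 0
      hpre hinit
  have halt : populate_boxes_alt data
      = ((PySem.List.sorted
            ((PySem.List.enumerate data 0).foldl stepB (PySem.Dict.empty, PySem.Dict.empty)).2.items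
            (fun kv => kv.2) false).foldl
          (bucketStep ((PySem.List.enumerate data 0).foldl stepB (PySem.Dict.empty, PySem.Dict.empty)).1)
          (List.replicate 256 [])).map
        (fun pairs => (pairs.foldl (fun d p => d.insert p.1 p.2) PySem.Dict.empty).items) := rfl
  have hsorted : PySem.List.sorted
      ((PySem.List.enumerate data 0).foldl stepB (PySem.Dict.empty, PySem.Dict.empty)).2.items
      (fun kv => kv.2) false
      = ((PySem.List.enumerate data 0).foldl stepB (PySem.Dict.empty, PySem.Dict.empty)).2.items :=
    PySem.List.sorted_eq_of_perm_of_pairwise_lt _ _ _ (List.Perm.refl _) hpair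
  rw [halt, hsorted]
  unfold populate_boxes
  set bA := data.foldl stepA (List.replicate 256 PySem.Dict.empty) with hbA
  set lv := ((PySem.List.enumerate data 0).foldl stepB (PySem.Dict.empty, PySem.Dict.empty)).1 with hlv
  set it := ((PySem.List.enumerate data 0).foldl stepB (PySem.Dict.empty, PySem.Dict.empty)).2 with hit
  set bs := it.items.foldl (bucketStep lv) (List.replicate 256 []) with hbs
  have hbslen : bs.length = 256 := by rw [hbs, bucket_length, List.length_replicate]
  have hbsh : ∀ h : Nat, bs.getD h []
      = (it.items.filter (fun p => hashIdx p.1 == h)).map (fun p => (p.1, lv.getD p.1 0)) := by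
    intro h
    rw [hbs, bucket_getD lv it.items (List.replicate 256 []) (by rw [List.length_replicate]) h,
      List.getD_eq_getElem?_getD, List.getElem?_replicate]
    split <;> rfl
  apply List.ext_getElem
  · simp [hbslen, hlen]
  · intro h h1 h2
    simp only [List.getElem_map]
    have hh256 : h < 256 := by simpa [hlen] using h1
    have hbAh : bA[h]'(by omega) = bA.getD h PySem.Dict.empty := by
      rw [List.getD_eq_getElem?_getD, List.getElem?_eq_getElem (by omega)]
      rfl
    have hbsh' : bs[h]'(by omega) = bs.getD h [] := by
      rw [List.getD_eq_getElem?_getD, List.getElem?_eq_getElem (by omega)]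
      rfl
    rw [hbAh, hbsh', hitems h, hbsh h]
    symm
    apply roundtrip
    have hsub : ((it.items.filter (fun p => hashIdx p.1 == h)).map
        (fun p => (p.1, lv.getD p.1 0))).map Prod.fst
        = (it.items.filter (fun p => hashIdx p.1 == h)).map Prod.fst := by
      rw [List.map_map]
      rfl
    rw [hsub]
    exact List.Nodup.sublist (List.Sublist.map Prod.fst List.filter_sublist) hnd
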